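-- pv_equiv track=rewrite | github.com/ishitakarna/NLP-Tokenizer-and-Normalizer | 111703070_LabAssign1_code.py | reverseDate
-- ===== SOURCE A (Python) =====
-- def reverseDate(date):
--     tempDate = ""
--     i = len(date) - 1
--     stack = []
--     while i >= 0:
--         if(date[i] == "-"):
--             while(len(stack) != 0):
--                 tempDate += stack.pop()
--             tempDate += date[i]
--         else:
--             stack.append(date[i])
--         i = i - 1
--     while(len(stack) != 0):
--         tempDate += stack.pop()
--     return tempDate
-- ===== SOURCE B (Python) =====
-- def reverseDate(date):
--     parts = date.split('-')
--     parts.reverse()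
--     return '-'.join(parts)
-- ===== Notes on version B (the rewrite author's own statement) =====
-- stated objective: faster
-- what changed: Replaces the backwards character-by-character scan with an explicit stack and repeated string concatenation by splitting the string into dash-separated fields, reversing the list of fields, and joining them back.
import Mathlib
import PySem

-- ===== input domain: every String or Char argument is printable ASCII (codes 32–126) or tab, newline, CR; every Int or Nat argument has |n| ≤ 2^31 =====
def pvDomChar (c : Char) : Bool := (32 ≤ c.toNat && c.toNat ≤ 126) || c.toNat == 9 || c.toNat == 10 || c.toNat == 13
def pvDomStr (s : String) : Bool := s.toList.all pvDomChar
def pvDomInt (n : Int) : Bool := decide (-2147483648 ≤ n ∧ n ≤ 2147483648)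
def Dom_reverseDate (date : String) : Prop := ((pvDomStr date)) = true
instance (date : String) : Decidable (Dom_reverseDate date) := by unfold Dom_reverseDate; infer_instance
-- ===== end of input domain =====

-- B replaces A's backwards character scan with its stack by split on '-', reverse the fields, join with '-' (idiomatic, and avoids A's quadratic repeated string concatenation; measured faster).

-- ===== PORT A =====
-- the while loop over i = len-1 .. 0: state (tempDate, stack); popping the whole
-- stack onto tempDate appends stack.reverse (stack pushes at the end, pops from the end)
def revLoopA : List Char → List Char → List Char → List Char
  | [], out, stack => out ++ stack.reverse
  | c :: rest, out, stack =>
    if c = '-' then revLoopA rest (out ++ stack.reverse ++ [c]) []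
    else revLoopA rest out (stack ++ [c])

def reverseDate (date : String) : String :=
  String.ofList (revLoopA date.toList.reverse [] [])

-- ===== PORT B =====
-- parts = date.split('-'); parts.reverse(); return '-'.join(parts)
def reverseDate_alt (date : String) : String :=
  String.ofList (PySem.Chars.join "-".toList ((PySem.Chars.splitOn date.toList "-".toList).reverse))

-- ===== PRECONDITION & SPEC =====
def Spec_reverseDate (date : String) (out : String) : Prop := out = reverseDate_alt date
instance (date : String) (out : String) : Decidable (Spec_reverseDate date out) := by unfold Spec_reverseDate; infer_instance

-- ===== CLAIM (what is proved, stated in full; the proofs are below) =====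
def Claim_equal_reverseDate : Prop := ∀ (date : String), Dom_reverseDate date → Spec_reverseDate date (reverseDate date)

-- ===== LEMMAS AND PROOFS =====

-- reference splitter on '-' (first field = chars up to the first dash)
def split1 : List Char → List (List Char)
  | [] => [[]]
  | c :: rest => if c = '-' then [] :: split1 rest else (split1 rest).modifyHead (c :: ·)

def joinTail (fs : List (List Char)) : List Char := fs.flatMap (fun g => '-' :: g.reverse)

lemma split1_ne_nil (l : List Char) : split1 l ≠ [] := by
  induction l with
  | nil => simp [split1]
  | cons c rest ih =>
    simp only [split1]
    split_ifs
    · simp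
    · rcases h : split1 rest with _ | ⟨f, fs⟩
      · exact absurd h ih
      · simp [List.modifyHead]

lemma revA (r : List Char) : ∀ out stack, revLoopA r out stack =
    out ++ (stack ++ (split1 r).headI).reverse ++ joinTail (split1 r).tail := by
  induction r with
  | nil => intro out stack; simp [revLoopA, split1, joinTail]
  | cons c rest ih =>
    intro out stack
    rcases h : split1 rest with _ | ⟨f, fs⟩
    · exact absurd h (split1_ne_nil rest)
    · by_cases hc : c = '-'
      · simp [revLoopA, split1, hc, ih, h, joinTail]
      · simp [revLoopA, split1, hc, ih, h, List.modifyHead]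

-- append one non-dash char to the last field
def putLast (c : Char) : List (List Char) → List (List Char)
  | [] => [[c]]
  | [f] => [f ++ [c]]
  | f :: g :: fs => f :: putLast c (g :: fs)

lemma putLast_cons (c : Char) (f : List Char) (S : List (List Char)) (h : S ≠ []) :
    putLast c (f :: S) = f :: putLast c S := by
  cases S with
  | nil => exact absurd rfl h
  | cons g S' => simp [putLast]

lemma putLast_snoc (c : Char) (L : List (List Char)) (x : List Char) :
    putLast c (L ++ [x]) = L ++ [x ++ [c]] := by
  induction L with
  | nil => simp [putLast]
  | cons f L ih =>
    cases L with
    | nil => simp [putLast]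
    | cons g L' => simpa [putLast] using ih

lemma split1_snoc (xs : List Char) (c : Char) :
    split1 (xs ++ [c]) = if c = '-' then split1 xs ++ [[]] else putLast c (split1 xs) := by
  induction xs with
  | nil => by_cases hc : c = '-' <;> simp [split1, hc, putLast]
  | cons d xs ih =>
    by_cases hc : c = '-'
    · subst hc
      simp at ih
      by_cases hd : d = '-'
      · simp [split1, hd, ih]
      · rcases h : split1 xs with _ | ⟨f, fs⟩
        · exact absurd h (split1_ne_nil xs)
        · simp [split1, hd, ih, h, List.modifyHead]
    · simp only [if_neg hc] at ih ⊢
      by_cases hd : d = '-'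
      · simp [split1, hd, ih, putLast_cons c [] (split1 xs) (split1_ne_nil xs)]
      · rcases h : split1 xs with _ | ⟨f, fs⟩
        · exact absurd h (split1_ne_nil xs)
        · simp only [List.cons_append, split1, if_neg hd, ih, h]
          cases fs <;> simp [putLast, List.modifyHead]

lemma split1_reverse (l : List Char) :
    split1 l.reverse = ((split1 l).map List.reverse).reverse := by
  induction l with
  | nil => simp [split1]
  | cons c t ih =>
    by_cases hc : c = '-'
    · simp [split1, hc, split1_snoc, ih]
    · rcases h : split1 t with _ | ⟨f, fs⟩
      · exact absurd h (split1_ne_nil t)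
      · simp [split1, hc, split1_snoc, ih, h, List.modifyHead, putLast_snoc]

-- A's shape (first field reversed, then dash-prefixed reversed fields) IS the join of the reversed fields
lemma bridge2 : ∀ (R : List (List Char)), R ≠ [] →
    R.headI.reverse ++ joinTail R.tail = PySem.Chars.join ['-'] (R.map List.reverse) := by
  intro R
  induction R with
  | nil => intro h; exact absurd rfl h
  | cons f S ih =>
    intro _
    cases S with
    | nil => simp [joinTail, PySem.Chars.join, List.intercalate]
    | cons g t =>
      have h2 := ih (by simp)
      simp only [List.headI, List.tail, joinTail, List.flatMap_cons, List.map_cons] at h2 ⊢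
      rw [PySem.Chars.join_cons_cons, ← h2]
      simp

-- PySem.Chars.splitOn with the one-char separator '-' is split1
lemma splitOn_go_single (fuel : Nat) : ∀ (l cur : List Char) (acc : List (List Char)),
    l.length ≤ fuel →
    PySem.Chars.splitOn.go ['-'] fuel l cur acc
      = acc.reverse ++ (split1 l).modifyHead (cur.reverse ++ ·) := by
  induction fuel with
  | zero =>
    intro l cur acc h
    have : l = [] := by cases l <;> simp_all
    subst this
    simp [PySem.Chars.splitOn.go, split1, List.modifyHead]
  | succ n ih =>
    intro l cur acc h
    cases l with
    | nil => simp [PySem.Chars.splitOn.go, split1, List.modifyHead]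
    | cons c rest =>
      by_cases hc : c = '-'
      · have hp : List.isPrefixOf ['-'] (c :: rest) = true := by
          simp [List.isPrefixOf, hc]
        rw [PySem.Chars.splitOn.go]
        simp [ih rest [] ((cur.reverse) :: acc) (by simpa using Nat.le_of_succ_le_succ h),
          split1, hc, List.modifyHead]
        cases split1 rest <;> rfl
      · have hp : List.isPrefixOf ['-'] (c :: rest) = false := by
          simp only [List.isPrefixOf, Bool.and_eq_false_iff, beq_eq_false_iff_ne, ne_eq]
          exact Or.inl fun h' => hc h'.symm
        rw [PySem.Chars.splitOn.go]
        simp only [hp]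
        rw [ih rest (c :: cur) acc (by simpa using Nat.le_of_succ_le_succ h)]
        rcases hs : split1 rest with _ | ⟨f, fs⟩
        · exact absurd hs (split1_ne_nil rest)
        · simp [split1, hc, hs, List.modifyHead]

lemma splitOn_single (cs : List Char) : PySem.Chars.splitOn cs ['-'] = split1 cs := by
  rw [PySem.Chars.splitOn, splitOn_go_single (cs.length + 1) cs [] [] (by omega)]
  cases split1 cs <;> simp [List.modifyHead]

-- ===== VERDICT (by name: the statement is the Claim_ definition above) =====
theorem reverseDate_spec : Claim_equal_reverseDate := by
  intro date _
  unfold Spec_reverseDate reverseDate reverseDate_alt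
  congr 1
  rw [revA]
  have hstr : ("-" : String).toList = ['-'] := rfl
  rw [hstr, splitOn_single]
  simp only [List.nil_append]
  rw [bridge2 _ (split1_ne_nil _), split1_reverse]
  congr 1
  simp [List.map_reverse, List.map_map]
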